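-- pv_equiv track=rewrite | github.com/michaelfong2017/hase-scripts | BuildDataset/data_processor.py | normalize_bank
-- ===== SOURCE A (Python) =====
-- def normalize_bank(value):
--     """Normalize bank names using trusted mapping"""
--     if not value or '■' in str(value):
--         return value
--
--     value = str(value).strip()
--
--     # Direct mapping lookup
--     bank_mapping = {
--         "BOC": "BOC", "Bank of China (Hong Kong) Limited": "BOC",
--         "024": "HASE", "HANG SENG BANK": "HASE", "HANG SENG BANK LTD": "HASE",
--         "HANG SENG BANK LTD.": "HASE", "HASE": "HASE", "HASEHK": "HASE", "HSB": "HASE",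
--         "Hang Seng Bank": "HASE", "Hang Seng Bank Ltd": "HASE", "Hang Seng Bank Ltd.": "HASE",
--         "004": "HSBC", "HSBC": "HSBC", "HSBC HK": "HSBC", "HSBC Hong Kong": "HSBC",
--         "THE HONGKONG AND SHANGHAI BANKING CORPORATION LIMITED": "HSBC",
--         "The Hongkong and Shanghai Banking Corporation Limited": "HSBC",
--         "SCB": "STANDARD CHARTERED BANK (HONG KONG) LIMITED",
--         "STANDARD CHARTERED BANK (HONG KONG) LIMITED": "STANDARD CHARTERED BANK (HONG KONG) LIMITED"
--     }
--
--     # Try exact match first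
--     if value in bank_mapping:
--         return bank_mapping[value]
--
--     # Try case-insensitive match
--     for key, mapped_value in bank_mapping.items():
--         if key.upper() == value.upper():
--             return mapped_value
--
--     return value
-- ===== SOURCE B (Python) =====
-- _BANK_MAPPING = {
--     "BOC": "BOC", "Bank of China (Hong Kong) Limited": "BOC",
--     "024": "HASE", "HANG SENG BANK": "HASE", "HANG SENG BANK LTD": "HASE",
--     "HANG SENG BANK LTD.": "HASE", "HASE": "HASE", "HASEHK": "HASE", "HSB": "HASE",
--     "Hang Seng Bank": "HASE", "Hang Seng Bank Ltd": "HASE", "Hang Seng Bank Ltd.": "HASE",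
--     "004": "HSBC", "HSBC": "HSBC", "HSBC HK": "HSBC", "HSBC Hong Kong": "HSBC",
--     "THE HONGKONG AND SHANGHAI BANKING CORPORATION LIMITED": "HSBC",
--     "The Hongkong and Shanghai Banking Corporation Limited": "HSBC",
--     "SCB": "STANDARD CHARTERED BANK (HONG KONG) LIMITED",
--     "STANDARD CHARTERED BANK (HONG KONG) LIMITED": "STANDARD CHARTERED BANK (HONG KONG) LIMITED"
-- }
--
-- # One case-insensitive table built once: every original key keyed by its uppercase
-- # form (all case-colliding keys map to the same bank, so overwrites are harmless).
-- _TABLE = {k.upper(): v for k, v in _BANK_MAPPING.items()}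
--
--
-- def normalize_bank(value):
--     """Normalize bank names using trusted mapping"""
--     if not value or '■' in str(value):
--         return value
--     value = str(value).strip()
--     return _TABLE.get(value.upper(), value)
-- ===== Notes on version B (the rewrite author's own statement) =====
-- stated objective: simpler
-- what changed: A's two-phase lookup (exact dict hit, then a linear scan comparing each key upper-cased) is replaced by one case-insensitive table built once from the mapping (keys upper-cased; colliding keys all agree) and a single _TABLE.get(value.upper(), value) lookup, removing the loop and the separate exact-match branch.
import Mathlib
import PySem

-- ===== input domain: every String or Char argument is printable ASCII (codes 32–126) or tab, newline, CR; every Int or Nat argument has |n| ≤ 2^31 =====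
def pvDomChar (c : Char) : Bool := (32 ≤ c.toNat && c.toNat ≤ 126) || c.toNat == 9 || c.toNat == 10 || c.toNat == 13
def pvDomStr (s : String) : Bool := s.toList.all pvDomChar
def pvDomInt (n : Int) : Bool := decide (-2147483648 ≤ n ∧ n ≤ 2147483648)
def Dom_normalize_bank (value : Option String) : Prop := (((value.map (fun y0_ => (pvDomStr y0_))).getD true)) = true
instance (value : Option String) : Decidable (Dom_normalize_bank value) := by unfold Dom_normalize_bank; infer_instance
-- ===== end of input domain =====

-- B replaces A's exact-match-then-linear-case-insensitive-scan by one upper-cased table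
-- built once and a single normalized lookup (objective: simpler).

-- ===== PORT A =====
def bankMappingList : List (String × String) :=
  [("BOC","BOC"), ("Bank of China (Hong Kong) Limited","BOC"),
   ("024","HASE"), ("HANG SENG BANK","HASE"), ("HANG SENG BANK LTD","HASE"),
   ("HANG SENG BANK LTD.","HASE"), ("HASE","HASE"), ("HASEHK","HASE"), ("HSB","HASE"),
   ("Hang Seng Bank","HASE"), ("Hang Seng Bank Ltd","HASE"), ("Hang Seng Bank Ltd.","HASE"),
   ("004","HSBC"), ("HSBC","HSBC"), ("HSBC HK","HSBC"), ("HSBC Hong Kong","HSBC"),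
   ("THE HONGKONG AND SHANGHAI BANKING CORPORATION LIMITED","HSBC"),
   ("The Hongkong and Shanghai Banking Corporation Limited","HSBC"),
   ("SCB","STANDARD CHARTERED BANK (HONG KONG) LIMITED"),
   ("STANDARD CHARTERED BANK (HONG KONG) LIMITED","STANDARD CHARTERED BANK (HONG KONG) LIMITED")]

def bankMapping : PySem.Dict String String := PySem.Dict.ofList bankMappingList

-- the 'for key, mapped_value in bank_mapping.items(): if key.upper() == value.upper(): return mapped_value' loop
def ciScan (u : String) : List (String × String) → Option String
  | [] => none
  | (k, mv) :: rest => if PySem.Str.upper k = u then some mv else ciScan u rest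

def normalize_bank (value : Option String) : Option String :=
  match value with
  | none => none
  | some s =>
    if (s == "") || PySem.Str.isIn "■" s then value
    else
      let v := PySem.Str.strip s
      match bankMapping.get? v with
      | some mv => some mv
      | none =>
        match ciScan (PySem.Str.upper v) bankMapping.items with
        | some mv => some mv
        | none => some v

-- ===== PORT B =====
def bankMappingListB : List (String × String) := bankMappingList

-- _TABLE = {k.upper(): v for k, v in _BANK_MAPPING.items()}
def bankTable : PySem.Dict String String :=
  bankMappingListB.foldl (fun d p => d.insert (PySem.Str.upper p.1) p.2) PySem.Dict.empty

def normalize_bank_alt (value : Option String) : Option String :=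
  match value with
  | none => none
  | some s =>
    if (s == "") || PySem.Str.isIn "■" s then value
    else
      let v := PySem.Str.strip s
      some (bankTable.getD (PySem.Str.upper v) v)

-- ===== PRECONDITION & SPEC =====
def Spec_normalize_bank (value : Option String) (out : Option String) : Prop := out = normalize_bank_alt value
instance (value : Option String) (out : Option String) : Decidable (Spec_normalize_bank value out) := by unfold Spec_normalize_bank; infer_instance

-- ===== CLAIM (what is proved, stated in full; the proofs are below) =====
def Claim_equal_normalize_bank : Prop := ∀ (value : Option String), Dom_normalize_bank value → Spec_normalize_bank value (normalize_bank value)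

-- ===== LEMMAS AND PROOFS =====

-- keys of the mapping that agree after upper-casing always carry the same mapped value
def upperAgrees (l : List (String × String)) : Prop :=
  ∀ p ∈ l, ∀ q ∈ l, PySem.Str.upper p.1 = PySem.Str.upper q.1 → p.2 = q.2

theorem agrees_bankMappingList : upperAgrees bankMappingList := by unfold upperAgrees; decide

theorem bankMapping_items : bankMapping.items = bankMappingList := by decide

theorem agrees_of_cons {p : String × String} {l : List (String × String)}
    (h : upperAgrees (p :: l)) : upperAgrees l :=
  fun a ha b hb => h a (List.mem_cons_of_mem _ ha) b (List.mem_cons_of_mem _ hb)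

theorem agrees_of_append_left {l : List (String × String)} {l' : List (String × String)}
    (h : upperAgrees (l ++ l')) : upperAgrees l :=
  fun a ha b hb => h a (List.mem_append_left _ ha) b (List.mem_append_left _ hb)

theorem ciScan_mem {u mv : String} {l : List (String × String)}
    (h : ciScan u l = some mv) : ∃ q ∈ l, PySem.Str.upper q.1 = u ∧ q.2 = mv := by
  induction l with
  | nil => simp [ciScan] at h
  | cons p rest ih =>
    by_cases hc : PySem.Str.upper p.1 = u
    · refine ⟨p, List.mem_cons_self, hc, ?_⟩
      simpa [ciScan, hc] using h
    · rw [show ciScan u (p :: rest) = ciScan u rest from by simp [ciScan, hc]] at h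
      obtain ⟨q, hq, h1, h2⟩ := ih h
      exact ⟨q, List.mem_cons_of_mem _ hq, h1, h2⟩

theorem ciScan_append (u : String) (l1 l2 : List (String × String)) :
    ciScan u (l1 ++ l2) = (ciScan u l1).or (ciScan u l2) := by
  induction l1 with
  | nil => simp [ciScan]
  | cons p rest ih =>
    by_cases hc : PySem.Str.upper p.1 = u <;> simp [ciScan, hc, ih]

-- an exact key hit: the first case-insensitive match carries the same value
theorem scan_of_mem {l : List (String × String)} (hA : upperAgrees l) {k mv : String}
    (hm : (k, mv) ∈ l) : ciScan (PySem.Str.upper k) l = some mv := by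
  induction l with
  | nil => cases hm
  | cons p rest ih =>
    by_cases hc : PySem.Str.upper p.1 = PySem.Str.upper k
    · have := hA p List.mem_cons_self (k, mv) hm hc
      simp [ciScan, hc, this]
    · rcases List.mem_cons.mp hm with he | hr
      · rw [← he] at hc; exact absurd rfl hc
      · simp only [ciScan, if_neg hc]
        exact ih (agrees_of_cons hA) hr

-- the overwrite-fold table looks up exactly what the first-match scan finds
theorem table_get (l : List (String × String)) (d : PySem.Dict String String) (u : String)
    (hA : upperAgrees l) :
    (l.foldl (fun d p => d.insert (PySem.Str.upper p.1) p.2) d).get? u =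
      (ciScan u l).or (d.get? u) := by
  induction l using List.reverseRecOn generalizing d with
  | nil => simp [ciScan]
  | append_singleton l p ih =>
    rw [List.foldl_append, List.foldl_cons, List.foldl_nil,
        ciScan_append, PySem.Dict.get?_insert, ih _ (agrees_of_append_left hA)]
    by_cases hc : PySem.Str.upper p.1 = u
    · rw [if_pos hc.symm]
      cases hs : ciScan u l with
      | none => simp [ciScan, hc]
      | some mv =>
        obtain ⟨q, hq, h1, h2⟩ := ciScan_mem hs
        have : q.2 = p.2 :=
          hA q (List.mem_append_left _ hq) p (List.mem_append_right _ List.mem_cons_self)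
            (h1.trans hc.symm)
        simp [ciScan, hc, ← h2, this]
    · rw [if_neg (fun he => hc he.symm)]
      simp [ciScan, hc]

theorem exact_match_scan (v mv : String) (h : bankMapping.get? v = some mv) :
    ciScan (PySem.Str.upper v) bankMapping.items = some mv := by
  have hm : (v, mv) ∈ bankMapping.items := PySem.Dict.mem_items_of_get?_eq_some _ h
  rw [bankMapping_items] at hm ⊢
  exact scan_of_mem agrees_bankMappingList hm

theorem scan_eq_table (u v : String) :
    (ciScan u bankMapping.items).getD v = bankTable.getD u v := by
  rw [bankMapping_items, PySem.Dict.getD_eq_get?_getD]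
  simp only [bankTable, bankMappingListB]
  rw [table_get _ _ _ agrees_bankMappingList]
  simp

-- ===== VERDICT (by name: the statement is the Claim_ definition above) =====
theorem normalize_bank_spec : Claim_equal_normalize_bank := by
  intro value _
  unfold Spec_normalize_bank
  cases value with
  | none => rfl
  | some s =>
    simp only [normalize_bank, normalize_bank_alt]
    split_ifs with hg
    · rfl
    · set v := PySem.Str.strip s with hv
      cases hm : bankMapping.get? v with
      | some mv =>
        have hs := exact_match_scan v mv hm
        have ht := scan_eq_table (PySem.Str.upper v) v
        rw [hs] at ht
        simp only [Option.getD_some] at ht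
        rw [ht]
      | none =>
        have ht := scan_eq_table (PySem.Str.upper v) v
        cases hc : ciScan (PySem.Str.upper v) bankMapping.items with
        | some mv =>
          rw [hc] at ht
          simp only [Option.getD_some] at ht
          rw [ht]
        | none =>
          rw [hc] at ht
          simp only [Option.getD_none] at ht
          exact congrArg some ht
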